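-- pv_equiv track=rewrite | github.com/benjfield/advent_of_code | 2023/day15.py | hash_1
-- ===== SOURCE A (Python) =====
-- def hash_function(text):
--     result = 0
--     for char in text:
--         result += ord(char)
--         result = result * 17
--         result = result%256
--     return result
--
-- def hash_1(text):
--     hashes = []
--
--     for label in text.split(","):
--         hashes.append(label)
--
--     results = []
--     for hash in hashes:
--         results.append(hash_function(hash))
--
--     return sum(results)
-- ===== SOURCE B (Python) =====
-- def hash_1(text):
--     # Single streaming pass: no split, no intermediate lists.
--     total = 0
--     current = 0
--     for c in text:
--         if c == ',':
--             total += current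
--             current = 0
--         else:
--             current = (current + ord(c)) * 17 % 256
--     return total + current
-- ===== Notes on version B (the rewrite author's own statement) =====
-- stated objective: alternative
-- what changed: B replaces the comma-splitting plus two accumulation lists and a final sum with a single streaming pass over the characters keeping only a running total and the current segment's hash.
import Mathlib
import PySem

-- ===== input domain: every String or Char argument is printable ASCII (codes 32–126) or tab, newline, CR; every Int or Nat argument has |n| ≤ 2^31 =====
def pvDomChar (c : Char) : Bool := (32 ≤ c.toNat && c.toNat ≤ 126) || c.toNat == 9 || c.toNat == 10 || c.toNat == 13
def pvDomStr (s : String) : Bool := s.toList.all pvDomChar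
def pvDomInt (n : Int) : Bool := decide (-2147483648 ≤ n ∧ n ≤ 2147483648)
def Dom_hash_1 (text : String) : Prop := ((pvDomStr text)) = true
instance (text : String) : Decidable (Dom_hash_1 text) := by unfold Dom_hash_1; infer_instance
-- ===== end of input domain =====

-- B streams over the characters with a running total and current-segment hash instead of
-- splitting on ',' into lists and summing per-label hashes (objective: alternative).


-- ===== PORT A =====
def hash_function (text : String) : Int :=
  text.toList.foldl (fun result char =>
    PySem.Int.mod ((result + (char.toNat : Int)) * 17) 256) 0

def hash_1 (text : String) : Int :=
  -- text.split(","): sep is non-empty so split? always returns some; getD [] is unreachable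
  let hashes := ((PySem.Str.split? text ",").getD []).foldl (fun acc label => acc ++ [label]) []
  let results := hashes.foldl (fun acc h => acc ++ [hash_function h]) []
  results.sum

-- ===== PORT B =====
def hash_1_alt (text : String) : Int :=
  let p := text.toList.foldl (fun (st : Int × Int) c =>
    if c = ',' then (st.1 + st.2, 0)
    else (st.1, PySem.Int.mod ((st.2 + (c.toNat : Int)) * 17) 256)) (0, 0)
  p.1 + p.2

-- ===== PRECONDITION & SPEC =====
def Spec_hash_1 (text : String) (out : Int) : Prop := out = hash_1_alt text
instance (text : String) (out : Int) : Decidable (Spec_hash_1 text out) := by unfold Spec_hash_1; infer_instance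

-- ===== CLAIM (what is proved, stated in full; the proofs are below) =====
def Claim_equal_hash_1 : Prop := ∀ (text : String), Dom_hash_1 text → Spec_hash_1 text (hash_1 text)

-- ===== LEMMAS AND PROOFS =====

/-- Splitting a char list on a single comma, accumulating the current segment. -/
def seg : List Char → List Char → List (List Char)
  | pre, [] => [pre]
  | pre, c :: rest => if c = ',' then pre :: seg [] rest else seg (pre ++ [c]) rest

/-- The char-level hash step shared by both ports. -/
def hstep (r : Int) (c : Char) : Int := PySem.Int.mod ((r + (c.toNat : Int)) * 17) 256

/-- Sum of segment hashes, with the first segment's hash continued from `h`. -/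
def segSum : Int → List Char → Int
  | h, [] => h
  | h, c :: rest => if c = ',' then h + segSum 0 rest else segSum (hstep h c) rest

lemma go_single : ∀ (fuel : Nat) (l cur : List Char) (acc : List (List Char)) (_ : l.length < fuel),
    PySem.Chars.splitOn.go [','] fuel l cur acc
      = acc.reverse ++ seg cur.reverse l := by
  intro fuel
  induction fuel with
  | zero => intro l cur acc h; omega
  | succ n ih =>
    intro l cur acc h
    rw [PySem.Chars.splitOn.go.eq_def]
    cases l with
    | nil => simp [seg]
    | cons c rest =>
      by_cases hc : c = ','
      · subst hc
        have hp : List.isPrefixOf [','] (',' :: rest) = true := by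
          simp [List.isPrefixOf]
        simp only [hp, if_true, List.length_cons, List.length_nil,
          List.drop_succ_cons, List.drop_zero]
        rw [ih rest [] (cur.reverse :: acc) (by simp at h ⊢; omega)]
        simp [seg]
      · have hp : List.isPrefixOf [','] (c :: rest) = false := by
          simp [List.isPrefixOf]; exact fun e => hc e.symm
        simp only [hp, Bool.false_eq_true, if_false]
        rw [ih rest (c :: cur) acc (by simp at h ⊢; omega)]
        simp [seg, hc]

lemma splitOn_single (l : List Char) : PySem.Chars.splitOn l [','] = seg [] l := by
  unfold PySem.Chars.splitOn
  rw [go_single (l.length + 1) l [] [] (by omega)]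
  simp

lemma hash_function_ofList (cs : List Char) :
    hash_function (String.ofList cs) = cs.foldl hstep 0 := by
  unfold hash_function hstep
  rw [String.toList_ofList]

lemma foldl_hstep_append (cur : List Char) (c : Char) :
    (cur ++ [c]).foldl hstep 0 = hstep (cur.foldl hstep 0) c := by
  simp

lemma sum_seg (l : List Char) : ∀ (cur : List Char),
    ((seg cur l).map (fun cs => cs.foldl hstep 0)).sum = segSum (cur.foldl hstep 0) l := by
  induction l with
  | nil => intro cur; simp [seg, segSum]
  | cons c rest ih =>
    intro cur
    by_cases hc : c = ','
    · subst hc; simp [seg, segSum, ih []]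
    · simp only [seg, segSum, hc, if_false]
      rw [ih (cur ++ [c]), foldl_hstep_append]

lemma bfold (l : List Char) : ∀ (t h : Int),
    (l.foldl (fun (st : Int × Int) c =>
      if c = ',' then (st.1 + st.2, 0)
      else (st.1, hstep st.2 c)) (t, h)).1
    + (l.foldl (fun (st : Int × Int) c =>
      if c = ',' then (st.1 + st.2, 0)
      else (st.1, hstep st.2 c)) (t, h)).2
    = t + segSum h l := by
  induction l with
  | nil => intro t h; simp [segSum]
  | cons c rest ih =>
    intro t h
    by_cases hc : c = ','
    · subst hc
      simp only [List.foldl_cons, if_true, segSum]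
      rw [ih]; ring
    · simp only [List.foldl_cons, hc, if_false, segSum]
      exact ih t (hstep h c)

lemma foldl_append_singleton {α β : Type} (f : β → α) (l : List β) :
    l.foldl (fun acc h => acc ++ [f h]) [] = l.map f := by
  have : ∀ (init : List α), l.foldl (fun acc h => acc ++ [f h]) init = init ++ l.map f := by
    induction l with
    | nil => intro init; simp
    | cons x xs ih => intro init; simp [ih]
  simpa using this []

theorem hash_1_eq_alt (text : String) : hash_1 text = hash_1_alt text := by
  unfold hash_1 hash_1_alt
  have hsplit : PySem.Str.split? text "," =
      some ((PySem.Chars.splitOn text.toList [',']).map String.ofList) := by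
    simp [PySem.Str.split?, PySem.Chars.split?]
  rw [hsplit]
  simp only [Option.getD_some]
  rw [foldl_append_singleton (f := fun x : String => x), List.map_id']
  rw [foldl_append_singleton (f := hash_function)]
  rw [splitOn_single, List.map_map]
  have hmap : (seg [] text.toList).map (hash_function ∘ String.ofList)
      = (seg [] text.toList).map (fun cs => cs.foldl hstep 0) := by
    apply List.map_congr_left
    intro cs _
    simpa using hash_function_ofList cs
  rw [hmap, sum_seg]
  have := bfold text.toList 0 0
  
  simp only [hstep] at this ⊢
  rw [this]
  simp

-- ===== VERDICT (by name: the statement is the Claim_ definition above) =====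
theorem hash_1_spec : Claim_equal_hash_1 := by
  intro text _
  exact hash_1_eq_alt text
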